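-- pv_equiv track=rewrite | github.com/alemayehutseganew/medical-telegram-warehouse | src/yolo_detect.py | derive_category
-- ===== SOURCE A (Python) =====
-- from typing import List
--
-- PRODUCT_LABELS = {"bottle", "cup", "vase", "handbag", "backpack", "book", "laptop", "cell phone"}
--
-- def derive_category(labels: List[str]) -> str:
--     has_person = "person" in labels
--     has_product = any(label in PRODUCT_LABELS for label in labels)
--     if has_person and has_product:
--         return "promotional"
--     if has_product:
--         return "product_display"
--     if has_person:
--         return "lifestyle"
--     return "other"
-- ===== SOURCE B (Python) =====
-- PRODUCT_LABELS = {"bottle", "cup", "vase", "handbag", "backpack", "book", "laptop", "cell phone"}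
--
-- _CATEGORIES = ("other", "lifestyle", "product_display", "promotional")
--
-- def derive_category(labels):
--     mask = 0
--     for label in labels:
--         mask |= (1 if label == "person" else 0) | (2 if label in PRODUCT_LABELS else 0)
--     return _CATEGORIES[mask]
-- ===== Notes on version B (the rewrite author's own statement) =====
-- stated objective: alternative
-- what changed: B replaces A's two independent membership scans plus a four-way if-cascade by a single fold computing a 2-bit mask (bit0 = person seen, bit1 = product seen) and indexing a fixed 4-entry category table with it.
import Mathlib
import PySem

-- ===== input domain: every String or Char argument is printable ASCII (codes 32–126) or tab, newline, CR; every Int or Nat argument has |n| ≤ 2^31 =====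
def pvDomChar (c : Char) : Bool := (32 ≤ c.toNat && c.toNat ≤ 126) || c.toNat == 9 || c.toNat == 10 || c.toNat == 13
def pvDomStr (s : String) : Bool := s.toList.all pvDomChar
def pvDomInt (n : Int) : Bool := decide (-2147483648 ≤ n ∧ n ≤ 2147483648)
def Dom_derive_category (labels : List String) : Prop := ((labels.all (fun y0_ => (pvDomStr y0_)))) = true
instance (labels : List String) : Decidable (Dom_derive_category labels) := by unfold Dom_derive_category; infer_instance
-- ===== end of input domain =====

-- B replaces A's two membership scans + if-cascade by one fold building a 2-bit mask and a table lookup (objective: alternative decomposition).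

-- ===== PORT A =====
-- Python set PRODUCT_LABELS; only used for membership tests, so the distinct-element list suffices.
def productLabels : List String :=
  ["bottle", "cup", "vase", "handbag", "backpack", "book", "laptop", "cell phone"]

def derive_category (labels : List String) : String :=
  let has_person := labels.contains "person"
  let has_product := labels.any (fun l => productLabels.contains l)
  if has_person && has_product then "promotional"
  else if has_product then "product_display"
  else if has_person then "lifestyle"
  else "other"

-- ===== PORT B =====
def pvCategories : List String := ["other", "lifestyle", "product_display", "promotional"]

def derive_category_alt (labels : List String) : String :=
  let mask := labels.foldl
    (fun m l => m ||| ((if l == "person" then 1 else 0) ||| (if productLabels.contains l then 2 else 0))) 0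
  pvCategories.getD mask "other"

-- ===== PRECONDITION & SPEC =====
def Spec_derive_category (labels : List String) (out : String) : Prop := out = derive_category_alt labels
instance (labels : List String) (out : String) : Decidable (Spec_derive_category labels out) := by unfold Spec_derive_category; infer_instance

-- ===== CLAIM (what is proved, stated in full; the proofs are below) =====
def Claim_equal_derive_category : Prop := ∀ (labels : List String), Dom_derive_category labels → Spec_derive_category labels (derive_category labels)

-- ===== LEMMAS AND PROOFS =====

theorem pv_mask_fold (labels : List String) (m : Nat) :
    labels.foldl
      (fun m l => m ||| ((if l == "person" then 1 else 0) ||| (if productLabels.contains l then 2 else 0))) m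
    = m ||| ((if "person" ∈ labels then 1 else 0)
        ||| (if (∃ x ∈ labels, x ∈ productLabels) then 2 else 0)) := by
  induction labels generalizing m with
  | nil => simp
  | cons l t ih =>
    rw [List.foldl_cons, ih]
    have hswap : ("person" = l) ↔ (l = "person") := eq_comm
    by_cases hpl : l = "person" <;> by_cases hq : l ∈ productLabels <;>
      by_cases hp' : "person" ∈ t <;> by_cases hq' : (∃ x ∈ t, x ∈ productLabels) <;>
        simp [hpl, hq, hp', hq', hswap, Nat.or_assoc] <;> congr 1

-- ===== VERDICT (by name: the statement is the Claim_ definition above) =====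
theorem derive_category_spec : Claim_equal_derive_category := by
  intro labels _
  unfold Spec_derive_category derive_category derive_category_alt
  rw [pv_mask_fold]
  by_cases hp : "person" ∈ labels <;>
    by_cases hq : (∃ x ∈ labels, x ∈ productLabels) <;>
      simp [hp, hq, pvCategories]
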